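-- pv_equiv track=rewrite | github.com/Technivian/CMS-Aegis | contracts/views.py | _extract_document_phase_event
-- ===== SOURCE A (Python) =====
-- def _split_csv_tags(raw_tags):
--     if not raw_tags:
--         return []
--     return [part.strip() for part in raw_tags.split(',') if part.strip()]
--
-- def _extract_document_phase_event(tags):
--     phase = ''
--     event = ''
--     for part in _split_csv_tags(tags):
--         if part.startswith('phase:') and not phase:
--             phase = part.split(':', 1)[1].strip()
--         if part.startswith('event:') and not event:
--             event = part.split(':', 1)[1].strip()
--     return phase, event
-- ===== SOURCE B (Python) =====
-- def _split_csv_tags(raw_tags):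
--     if not raw_tags:
--         return []
--     return [part.strip() for part in raw_tags.split(',') if part.strip()]
--
-- def _extract_document_phase_event(tags):
--     parts = _split_csv_tags(tags)
--
--     def first_value(prefix):
--         # first tag with this prefix whose extracted value is non-empty
--         for p in parts:
--             if p.startswith(prefix):
--                 v = p.split(':', 1)[1].strip()
--                 if v:
--                     return v
--         return ''
--
--     return first_value('phase:'), first_value('event:')
-- ===== Notes on version B (the rewrite author's own statement) =====
-- stated objective: simpler
-- what changed: Replaces the single combined loop threading a two-field accumulator with two independent short-circuiting first-match searches (first tag of each prefix with a non-empty extracted value), so no mutable state is carried.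
import Mathlib
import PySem

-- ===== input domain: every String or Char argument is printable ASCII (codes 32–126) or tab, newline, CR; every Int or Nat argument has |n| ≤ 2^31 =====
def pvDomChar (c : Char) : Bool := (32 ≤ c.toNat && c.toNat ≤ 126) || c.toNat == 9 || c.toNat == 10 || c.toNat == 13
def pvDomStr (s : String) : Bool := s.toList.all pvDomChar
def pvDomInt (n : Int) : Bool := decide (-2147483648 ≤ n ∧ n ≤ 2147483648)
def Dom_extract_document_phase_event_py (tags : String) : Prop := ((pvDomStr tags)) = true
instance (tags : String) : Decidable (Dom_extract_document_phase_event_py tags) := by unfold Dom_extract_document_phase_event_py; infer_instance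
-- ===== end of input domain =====

-- B replaces A's single loop threading a two-field accumulator with two independent
-- short-circuiting first-match searches (objective: simpler decomposition; same cost).

-- ===== PORT A =====
-- _split_csv_tags (helper shared verbatim by Source A and Source B)
-- raw_tags.split(','): sep is non-empty, so `split?` is always `some` and `.getD []` is never hit.
def split_csv_tags_py (raw_tags : String) : List String :=
  if raw_tags = "" then []
  else (((PySem.Str.split? raw_tags ",").getD []).filterMap (fun part =>
          let s := PySem.Str.strip part
          if s ≠ "" then some s else none))

-- part.split(':', 1)[1].strip(); the `.getD ""` is never hit at call sites: every caller
-- first checks part.startswith("phase:"/"event:"), so part contains ':' and index 1 exists.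
def tag_value_py (part : String) : String :=
  PySem.Str.strip ((PySem.List.pyGet? ((PySem.Str.splitMax? part ":" 1).getD []) 1).getD "")

def extract_document_phase_event_py (tags : String) : String × String :=
  (split_csv_tags_py tags).foldl
    (fun st part =>
      let phase := if PySem.Str.startswith part "phase:" && (st.1 == "") then tag_value_py part else st.1
      let event := if PySem.Str.startswith part "event:" && (st.2 == "") then tag_value_py part else st.2
      (phase, event))
    ("", "")

-- ===== PORT B =====
def first_value_py (pre : String) : List String → String
  | [] => ""
  | p :: rest =>
    if PySem.Str.startswith p pre then
      let v := tag_value_py p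
      if v ≠ "" then v else first_value_py pre rest
    else first_value_py pre rest

def extract_document_phase_event_py_alt (tags : String) : String × String :=
  let parts := split_csv_tags_py tags
  (first_value_py "phase:" parts, first_value_py "event:" parts)

-- ===== PRECONDITION & SPEC =====
def Spec_extract_document_phase_event_py (tags : String) (out : String × String) : Prop := out = extract_document_phase_event_py_alt tags
instance (tags : String) (out : String × String) : Decidable (Spec_extract_document_phase_event_py tags out) := by unfold Spec_extract_document_phase_event_py; infer_instance

-- ===== CLAIM (what is proved, stated in full; the proofs are below) =====
def Claim_equal_extract_document_phase_event_py : Prop := ∀ (tags : String), Dom_extract_document_phase_event_py tags → Spec_extract_document_phase_event_py tags (extract_document_phase_event_py tags)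

-- ===== LEMMAS AND PROOFS =====

theorem foldl_first_value (parts : List String) (ph ev : String) :
    parts.foldl
      (fun st part =>
        let phase := if PySem.Str.startswith part "phase:" && (st.1 == "") then tag_value_py part else st.1
        let event := if PySem.Str.startswith part "event:" && (st.2 == "") then tag_value_py part else st.2
        (phase, event))
      (ph, ev)
    = ((if ph = "" then first_value_py "phase:" parts else ph),
       (if ev = "" then first_value_py "event:" parts else ev)) := by
  induction parts generalizing ph ev with
  | nil => simp [first_value_py]
  | cons p rest ih =>
    simp only [List.foldl_cons, ih, first_value_py]
    by_cases hp : PySem.Chars.startswith p.toList ['p','h','a','s','e',':'] = true <;>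
    by_cases he : PySem.Chars.startswith p.toList ['e','v','e','n','t',':'] = true <;>
    by_cases h1 : ph = "" <;>
    by_cases h2 : ev = "" <;>
    by_cases hv : tag_value_py p = "" <;>
    simp [hp, he, h1, h2, hv]

-- ===== VERDICT (by name: the statement is the Claim_ definition above) =====
theorem extract_document_phase_event_py_spec : Claim_equal_extract_document_phase_event_py := by
  intro tags _
  unfold Spec_extract_document_phase_event_py extract_document_phase_event_py extract_document_phase_event_py_alt
  rw [foldl_first_value]
  simp
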